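-- pv_equiv track=rewrite | github.com/saidaladawi/universal-workshop-erp | phase3_backup/before-workshop_operations/universal_workshop/billing_management/receivables_management.py | _determine_dunning_level
-- ===== SOURCE A (Python) =====
-- from typing import Dict, List, Any, Tuple
--
-- def _determine_dunning_level(overdue_invoices: List[Dict]) -> str:
--     """Determine appropriate dunning level based on overdue period"""
--
--     if not overdue_invoices:
--         return "No Action"
--
--     max_overdue_days = max(inv.get("days_overdue", 0) for inv in overdue_invoices)
--
--     if max_overdue_days >= 90:
--         return "Final Notice"
--     elif max_overdue_days >= 60:
--         return "Second Reminder"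
--     elif max_overdue_days >= 30:
--         return "First Reminder"
--     elif max_overdue_days >= 7:
--         return "Gentle Reminder"
--     else:
--         return "No Action"
-- ===== SOURCE B (Python) =====
-- from typing import Dict, List, Any, Tuple
--
-- _TIERS = [(7, "Gentle Reminder"), (30, "First Reminder"), (60, "Second Reminder"), (90, "Final Notice")]
-- _LABELS = ["No Action"] + [label for _threshold, label in _TIERS]
--
-- def _rank(days):
--     r = 0
--     for i, (threshold, _label) in enumerate(_TIERS, 1):
--         if days >= threshold:
--             r = i
--     return r
--
-- def _determine_dunning_level(overdue_invoices: List[Dict]) -> str: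
--     if not overdue_invoices:
--         return "No Action"
--     best = 0
--     for inv in overdue_invoices:
--         best = max(best, _rank(inv.get("days_overdue", 0)))
--     return _LABELS[best]
-- ===== Notes on version B (the rewrite author's own statement) =====
-- stated objective: alternative
-- what changed: Replaces compute-max-days-then-branch with a data-driven tier table: each invoice is mapped to an ordinal severity rank and a single running-maximum of ranks indexes into a label list.
import Mathlib
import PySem

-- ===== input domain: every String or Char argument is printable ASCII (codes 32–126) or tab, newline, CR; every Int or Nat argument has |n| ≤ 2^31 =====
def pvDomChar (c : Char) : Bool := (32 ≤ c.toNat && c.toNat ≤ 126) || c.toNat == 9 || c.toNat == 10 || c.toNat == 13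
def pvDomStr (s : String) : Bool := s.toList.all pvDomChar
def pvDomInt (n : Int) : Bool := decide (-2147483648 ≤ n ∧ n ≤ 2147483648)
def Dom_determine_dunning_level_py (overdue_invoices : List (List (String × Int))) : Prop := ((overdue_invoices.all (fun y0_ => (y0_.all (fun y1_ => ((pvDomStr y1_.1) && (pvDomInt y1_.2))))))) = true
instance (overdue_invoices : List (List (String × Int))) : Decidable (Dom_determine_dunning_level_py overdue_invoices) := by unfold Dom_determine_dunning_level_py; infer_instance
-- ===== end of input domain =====

-- B replaces compute-max-days-then-branch with a tier table: each invoice is mapped to an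
-- ordinal severity rank, a running maximum of ranks is kept, and the result indexes a label list.

-- ===== PORT A =====
def determine_dunning_level_py (overdue_invoices : List (List (String × Int))) : String :=
  if overdue_invoices.isEmpty then "No Action"
  else
    match PySem.List.max? (overdue_invoices.map (fun inv => PySem.Dict.getD (PySem.Dict.mk inv) "days_overdue" 0)) (fun x : Int => x) with
    | none => "No Action"   -- unreachable: the list is nonempty (Python max of nonempty iterable)
    | some max_overdue_days =>
      if max_overdue_days ≥ 90 then "Final Notice"
      else if max_overdue_days ≥ 60 then "Second Reminder"
      else if max_overdue_days ≥ 30 then "First Reminder"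
      else if max_overdue_days ≥ 7 then "Gentle Reminder"
      else "No Action"

-- ===== PORT B =====
def pvTiers : List (Int × String) :=
  [(7, "Gentle Reminder"), (30, "First Reminder"), (60, "Second Reminder"), (90, "Final Notice")]

def pvLabels : List String := "No Action" :: pvTiers.map Prod.snd

def pvRank (days : Int) : Int :=
  (PySem.List.enumerate pvTiers 1).foldl (fun r p => if days ≥ p.2.1 then p.1 else r) 0

def determine_dunning_level_py_alt (overdue_invoices : List (List (String × Int))) : String :=
  match overdue_invoices with
  | [] => "No Action"
  | _ =>
    let best := overdue_invoices.foldl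
      (fun b inv => max b (pvRank (PySem.Dict.getD (PySem.Dict.mk inv) "days_overdue" 0))) 0
    match PySem.List.pyGet? pvLabels best with
    | some s => s
    | none => "No Action"   -- unreachable: 0 ≤ best ≤ 4 < |pvLabels|

-- ===== PRECONDITION & SPEC =====
def Spec_determine_dunning_level_py (overdue_invoices : List (List (String × Int))) (out : String) : Prop := out = determine_dunning_level_py_alt overdue_invoices
instance (overdue_invoices : List (List (String × Int))) (out : String) : Decidable (Spec_determine_dunning_level_py overdue_invoices out) := by unfold Spec_determine_dunning_level_py; infer_instance

-- ===== CLAIM (what is proved, stated in full; the proofs are below) =====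
def Claim_equal_determine_dunning_level_py : Prop := ∀ (overdue_invoices : List (List (String × Int))), Dom_determine_dunning_level_py overdue_invoices → Spec_determine_dunning_level_py overdue_invoices (determine_dunning_level_py overdue_invoices)

-- ===== LEMMAS AND PROOFS =====

theorem pvRank_closed (d : Int) :
    pvRank d = if d ≥ 90 then 4 else if d ≥ 60 then 3 else if d ≥ 30 then 2 else if d ≥ 7 then 1 else 0 := by
  simp [pvRank, pvTiers, PySem.List.enumerate]

theorem pvRank_nonneg (d : Int) : 0 ≤ pvRank d := by
  rw [pvRank_closed]; split_ifs <;> omega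

theorem pvRank_max (a b : Int) : pvRank (max a b) = max (pvRank a) (pvRank b) := by
  rw [pvRank_closed, pvRank_closed, pvRank_closed]
  rcases max_cases a b with ⟨h1, h2⟩ | ⟨h1, h2⟩ <;> rw [h1] <;> split_ifs <;> omega

theorem pvLabel_lookup (m : Int) :
    (match PySem.List.pyGet? pvLabels (pvRank m) with
     | some s => s
     | none => "No Action") =
    (if m ≥ 90 then "Final Notice"
     else if m ≥ 60 then "Second Reminder"
     else if m ≥ 30 then "First Reminder"
     else if m ≥ 7 then "Gentle Reminder"
     else "No Action") := by
  rw [pvRank_closed]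
  split_ifs <;> rfl

theorem pvFold_rank (f : List (String × Int) → Int) (t : List (List (String × Int))) (a : Int) :
    t.foldl (fun b inv => max b (pvRank (f inv))) (pvRank a)
      = pvRank ((t.map f).foldl max a) := by
  induction t generalizing a with
  | nil => rfl
  | cons x s ih =>
    simp only [List.foldl_cons, List.map_cons]
    rw [← pvRank_max, ih]

-- ===== VERDICT (by name: the statement is the Claim_ definition above) =====
theorem determine_dunning_level_py_spec : Claim_equal_determine_dunning_level_py := by
  unfold Claim_equal_determine_dunning_level_py
  intro xs _
  unfold Spec_determine_dunning_level_py
  cases xs with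
  | nil => rfl
  | cons x t =>
    unfold determine_dunning_level_py determine_dunning_level_py_alt
    simp only [List.isEmpty_cons, List.map_cons, PySem.List.max?_id_cons, List.foldl_cons,
      Bool.false_eq_true, if_false]
    rw [max_comm, max_eq_left (pvRank_nonneg _), pvFold_rank, pvLabel_lookup]
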